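-- pv_equiv track=rewrite | github.com/Cwagne17/Advent-of-Code | 2023/Day_3/main.py | check_left_right
-- ===== SOURCE A (Python) =====
-- def check_for_adjacent_part_numbers(lines, i, j, direction=1):
--     local_j = j
--     part_number = ""
--
--     while 0 <= local_j < len(lines[i]) and lines[i][local_j].isdigit():
--         part_number = (
--             lines[i][local_j] + part_number
--             if direction == -1
--             else part_number + lines[i][local_j]
--         )
--         local_j += direction
--
--     return part_number, local_j - direction
--
-- def check_left_right(lines, i, j):
--     parts = []
--
--     directions = [
--         (0, 1, 1),  # Right
--         (0, -1, -1),  # Left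
--     ]
--
--     for direction in directions:
--         x_offset, y_offset, x_direction = direction
--         part_number, local_j = check_for_adjacent_part_numbers(
--             lines, i + x_offset, j + y_offset, x_direction
--         )
--
--         if part_number:
--             parts.append((i, local_j, part_number))
--
--     return parts
-- ===== SOURCE B (Python) =====
-- def _lead(s):
--     num = ""
--     for ch in s:
--         if not ch.isdigit():
--             break
--         num += ch
--     return num
--
--
-- def _trail(s):
--     return _lead(s[::-1])[::-1]
--
--
-- def check_left_right(lines, i, j):
--     row = lines[i]
--     parts = []
--     if 0 <= j + 1 < len(row):
--         num = _lead(row[j + 1:])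
--         if num:
--             parts.append((i, j + len(num), num))
--     if 0 <= j - 1 < len(row):
--         num = _trail(row[:j])
--         if num:
--             parts.append((i, j - len(num), num))
--     return parts
-- ===== Notes on version B (the rewrite author's own statement) =====
-- stated objective: idiomatic
-- what changed: Replaced the direction-parametrized while-loop helper (char-by-char index walk accumulating a string, with a final index correction local_j - direction) by explicit right/left handling over string slices: the leading digit run of row[j+1:] and the trailing digit run of row[:j] (computed as the leading run of the reversed slice), with endpoint indices computed arithmetically from the run length. Pre_ excludes out-of-range i, where B raises IndexError but A happens to return [] when j <= -2 because its short-circuited while-condition never evaluates len(lines[i]).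
-- outside the precondition, e.g. on check_left_right(['a'], 1, -5): A returns [], B raises IndexError
import Mathlib
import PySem

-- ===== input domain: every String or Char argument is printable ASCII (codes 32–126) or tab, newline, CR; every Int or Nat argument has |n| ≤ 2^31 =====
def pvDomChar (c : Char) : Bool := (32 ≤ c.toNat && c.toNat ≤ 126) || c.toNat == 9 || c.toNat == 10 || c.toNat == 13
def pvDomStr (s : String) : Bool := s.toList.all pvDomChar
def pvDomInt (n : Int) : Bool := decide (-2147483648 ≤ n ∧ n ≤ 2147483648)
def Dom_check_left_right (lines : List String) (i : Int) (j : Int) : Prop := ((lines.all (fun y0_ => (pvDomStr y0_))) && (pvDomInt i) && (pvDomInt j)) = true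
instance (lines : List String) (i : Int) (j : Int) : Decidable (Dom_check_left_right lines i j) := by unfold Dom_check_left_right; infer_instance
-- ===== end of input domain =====

-- B replaces A's direction-parametrized while-loop helper by explicit right/left handling
-- over slices (leading digit run of row[j+1:], trailing digit run of row[:j]); idiomatic, not faster.


-- ===== PORT A =====
-- while-loop of check_for_adjacent_part_numbers, fueled (fuel ≥ remaining iterations);
-- state = (local_j, part_number); exact: bounds check 0 ≤ lj < len and isdigit as in Python
def pvAdjLoop (rc : List Char) (direction : Int) : Nat → Int → List Char → List Char × Int
  | 0, lj, pn => (pn, lj)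
  | f + 1, lj, pn =>
    if 0 ≤ lj ∧ lj < (rc.length : Int) then
      match PySem.List.pyGet? rc lj with
      | some c =>
        if PySem.Chars.isdigit c then
          pvAdjLoop rc direction f (lj + direction)
            (if direction = -1 then c :: pn else pn ++ [c])
        else (pn, lj)
      | none => (pn, lj)
    else (pn, lj)

def check_for_adjacent_part_numbers (lines : List String) (i : Int) (j : Int)
    (direction : Int) : List Char × Int :=
  match PySem.List.pyGet? lines i with
  | none => ([], 0)  -- Python raises IndexError here; excluded by Pre_
  | some row =>
    let rc := row.toList
    let r := pvAdjLoop rc direction (rc.length + 1) j []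
    (r.1, r.2 - direction)

def check_left_right (lines : List String) (i : Int) (j : Int) : List (Int × Int × String) :=
  let directions : List (Int × Int × Int) := [(0, 1, 1), (0, -1, -1)]
  directions.foldl
    (fun parts d =>
      let r := check_for_adjacent_part_numbers lines (i + d.1) (j + d.2.1) d.2.2
      if r.1 ≠ [] then parts ++ [(i, r.2, String.ofList r.1)] else parts)
    []

-- ===== PORT B =====
-- _lead: for ch in s: break on non-digit, else append
def pvLead : List Char → List Char
  | [] => []
  | c :: cs => if PySem.Chars.isdigit c then c :: pvLead cs else []

-- _trail(s) = _lead(s[::-1])[::-1]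
def pvTrail (s : List Char) : List Char := (pvLead s.reverse).reverse

def check_left_right_alt (lines : List String) (i : Int) (j : Int) : List (Int × Int × String) :=
  match PySem.List.pyGet? lines i with
  | none => []  -- Python raises IndexError here; excluded by Pre_
  | some row =>
    let rc := row.toList
    let p1 : List (Int × Int × String) :=
      if 0 ≤ j + 1 ∧ j + 1 < (rc.length : Int) then
        let num := pvLead (PySem.List.slice rc (some (j + 1)) none)
        if num ≠ [] then [(i, j + num.length, String.ofList num)] else []
      else []
    let p2 : List (Int × Int × String) :=
      if 0 ≤ j - 1 ∧ j - 1 < (rc.length : Int) then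
        let num := pvTrail (PySem.List.slice rc none (some j))
        if num ≠ [] then [(i, j - num.length, String.ofList num)] else []
      else []
    p1 ++ p2

-- ===== PRECONDITION & SPEC =====
-- Pre_ excludes out-of-range i: there B raises IndexError (lines[i]); A raises too unless
-- j <= -2, where A's short-circuited while-condition never evaluates len(lines[i]) and it returns [].
def Pre_check_left_right (lines : List String) (i : Int) (j : Int) : Prop :=
  PySem.Raise.InRange lines.length i
instance (lines : List String) (i : Int) (j : Int) : Decidable (Pre_check_left_right lines i j) := by unfold Pre_check_left_right; infer_instance

def pvWitness_check_left_right : List String × Int × Int := (["4a12"], 0, 1)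

def Spec_check_left_right (lines : List String) (i : Int) (j : Int) (out : List (Int × Int × String)) : Prop := out = check_left_right_alt lines i j
instance (lines : List String) (i : Int) (j : Int) (out : List (Int × Int × String)) : Decidable (Spec_check_left_right lines i j out) := by unfold Spec_check_left_right; infer_instance

-- ===== CLAIM (what is proved, stated in full; the proofs are below) =====
def Claim_equal_check_left_right : Prop := ∀ (lines : List String) (i : Int) (j : Int), Dom_check_left_right lines i j → Pre_check_left_right lines i j → Spec_check_left_right lines i j (check_left_right lines i j)

-- ===== LEMMAS AND PROOFS =====

theorem pvAdjLoop_neg (rc : List Char) (d : Int) (f : Nat) (lj : Int) (pn : List Char)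
    (h : lj < 0) : pvAdjLoop rc d f lj pn = (pn, lj) := by
  cases f with
  | zero => rfl
  | succ f => simp only [pvAdjLoop]; rw [if_neg (by omega)]

theorem pvAdjLoop_ge (rc : List Char) (d : Int) (f : Nat) (lj : Int) (pn : List Char)
    (h : (rc.length : Int) ≤ lj) : pvAdjLoop rc d f lj pn = (pn, lj) := by
  cases f with
  | zero => rfl
  | succ f => simp only [pvAdjLoop]; rw [if_neg (by omega)]

theorem pvTrail_concat (xs : List Char) (c : Char) :
    pvTrail (xs ++ [c]) = if PySem.Chars.isdigit c then pvTrail xs ++ [c] else [] := by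
  unfold pvTrail
  rw [List.reverse_append]
  simp only [List.reverse_cons, List.reverse_nil, List.nil_append, List.singleton_append, pvLead]
  split_ifs <;> simp

-- Right direction: from a Nat position m, the loop collects the leading digit run of (drop m rc).
theorem pvAdjLoop_right (rc : List Char) :
    ∀ (f m : Nat) (pn : List Char), rc.length - m < f →
      pvAdjLoop rc 1 f (m : Int) pn
        = (pn ++ pvLead (rc.drop m), ((m + (pvLead (rc.drop m)).length : Nat) : Int)) := by
  intro f
  induction f with
  | zero => intro m pn h; omega
  | succ f ih =>
    intro m pn h
    by_cases hm : m < rc.length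
    · have hget : PySem.List.pyGet? rc (m : Int) = some rc[m] := by
        simp [List.getElem?_eq_getElem hm]
      have hdrop : rc.drop m = rc[m] :: rc.drop (m + 1) := List.drop_eq_getElem_cons hm
      simp only [pvAdjLoop]
      rw [if_pos ⟨by positivity, by exact_mod_cast hm⟩, hget]
      by_cases hd : PySem.Chars.isdigit rc[m]
      · simp only [hd, if_pos, if_neg (by norm_num : (1:Int) ≠ -1)]
        have : (m : Int) + 1 = ((m + 1 : Nat) : Int) := by push_cast; ring
        rw [this, ih (m + 1) (pn ++ [rc[m]]) (by omega)]
        rw [hdrop]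
        simp only [pvLead, hd, if_pos, Prod.mk.injEq]
        refine ⟨by simp, by simp; ring⟩
      · simp only [hd, Bool.false_eq_true, ite_false]
        rw [hdrop]
        simp only [pvLead, hd, Bool.false_eq_true, ite_false]
        simp
    · have : rc.drop m = [] := List.drop_eq_nil_of_le (by omega)
      rw [pvAdjLoop_ge rc 1 (f + 1) (m : Int) pn (by exact_mod_cast (by omega : rc.length ≤ m))]
      simp [this, pvLead]

-- Left direction: from Nat position m < rc.length, the loop collects the trailing digit run of (take (m+1) rc).
theorem pvAdjLoop_left (rc : List Char) :
    ∀ (f m : Nat) (pn : List Char), m < f → m < rc.length →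
      pvAdjLoop rc (-1) f (m : Int) pn
        = (pvTrail (rc.take (m + 1)) ++ pn, (m : Int) - (pvTrail (rc.take (m + 1))).length) := by
  intro f
  induction f with
  | zero => intro m pn h; omega
  | succ f ih =>
    intro m pn hf hm
    have hget : PySem.List.pyGet? rc (m : Int) = some rc[m] := by
      simp [List.getElem?_eq_getElem hm]
    have htake : rc.take (m + 1) = rc.take m ++ [rc[m]] := by
      rw [List.take_add_one]; simp [List.getElem?_eq_getElem hm]
    simp only [pvAdjLoop]
    rw [if_pos ⟨by positivity, by exact_mod_cast hm⟩, hget]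
    by_cases hd : PySem.Chars.isdigit rc[m]
    · simp only [hd, if_pos]
      rw [htake, pvTrail_concat, if_pos hd]
      cases m with
      | zero =>
        rw [pvAdjLoop_neg rc (-1) f ((0 : Nat) + -1 : Int) (rc[0] :: pn) (by norm_num)]
        simp [pvTrail, pvLead]
      | succ m' =>
        have : ((m' + 1 : Nat) : Int) + -1 = ((m' : Nat) : Int) := by push_cast; ring
        rw [this, ih m' (rc[m' + 1] :: pn) (by omega) (by omega)]
        simp only [Prod.mk.injEq]
        refine ⟨by simp, by simp⟩
    · simp only [hd, Bool.false_eq_true, ite_false]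
      rw [htake, pvTrail_concat, if_neg (by simp [hd])]
      simp

-- Right side: A's fold contribution for direction (0,1,1) equals B's p1.
theorem rightPart (rc : List Char) (i j : Int) :
    (if (pvAdjLoop rc 1 (rc.length + 1) (j + 1) []).1 ≠ [] then
        [(i, (pvAdjLoop rc 1 (rc.length + 1) (j + 1) []).2 - 1,
          String.ofList (pvAdjLoop rc 1 (rc.length + 1) (j + 1) []).1)]
      else ([] : List (Int × Int × String)))
    = (if 0 ≤ j + 1 ∧ j + 1 < (rc.length : Int) then
        if pvLead (PySem.List.slice rc (some (j + 1)) none) ≠ [] then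
          [(i, j + (pvLead (PySem.List.slice rc (some (j + 1)) none)).length,
            String.ofList (pvLead (PySem.List.slice rc (some (j + 1)) none)))]
        else []
      else []) := by
  by_cases h0 : 0 ≤ j + 1
  · by_cases h1 : j + 1 < (rc.length : Int)
    · obtain ⟨m, hm⟩ : ∃ m : Nat, j + 1 = (m : Int) :=
        ⟨(j + 1).toNat, (Int.toNat_of_nonneg h0).symm⟩
      have hmlt : m < rc.length := by omega
      rw [if_pos (show 0 ≤ j + 1 ∧ j + 1 < (rc.length : Int) from ⟨h0, h1⟩), hm,
        pvAdjLoop_right rc (rc.length + 1) m [] (by omega),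
        PySem.List.slice_from rc (show (0 : Int) ≤ (m : Int) from by positivity)]
      simp only [Int.toNat_natCast, List.nil_append]
      by_cases hne : pvLead (rc.drop m) = []
      · simp [hne]
      · rw [if_pos hne, if_pos hne]
        have : ((m + (pvLead (rc.drop m)).length : Nat) : Int) - 1
            = j + (pvLead (rc.drop m)).length := by push_cast; omega
        rw [this]
    · rw [pvAdjLoop_ge rc 1 (rc.length + 1) (j + 1) [] (by omega),
        if_neg (show ¬(0 ≤ j + 1 ∧ j + 1 < (rc.length : Int)) from by omega)]
      simp
  · rw [pvAdjLoop_neg rc 1 (rc.length + 1) (j + 1) [] (by omega),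
      if_neg (show ¬(0 ≤ j + 1 ∧ j + 1 < (rc.length : Int)) from by omega)]
    simp

-- Left side: A's fold contribution for direction (0,-1,-1) equals B's p2.
theorem leftPart (rc : List Char) (i j : Int) :
    (if (pvAdjLoop rc (-1) (rc.length + 1) (j + -1) []).1 ≠ [] then
        [(i, (pvAdjLoop rc (-1) (rc.length + 1) (j + -1) []).2 - -1,
          String.ofList (pvAdjLoop rc (-1) (rc.length + 1) (j + -1) []).1)]
      else ([] : List (Int × Int × String)))
    = (if 0 ≤ j - 1 ∧ j - 1 < (rc.length : Int) then
        if pvTrail (PySem.List.slice rc none (some j)) ≠ [] then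
          [(i, j - (pvTrail (PySem.List.slice rc none (some j))).length,
            String.ofList (pvTrail (PySem.List.slice rc none (some j))))]
        else []
      else []) := by
  by_cases h0 : 0 ≤ j - 1
  · by_cases h1 : j - 1 < (rc.length : Int)
    · obtain ⟨m, hm⟩ : ∃ m : Nat, j + -1 = (m : Int) :=
        ⟨(j - 1).toNat, by omega⟩
      have hmlt : m < rc.length := by omega
      rw [if_pos (show 0 ≤ j - 1 ∧ j - 1 < (rc.length : Int) from ⟨h0, h1⟩), hm,
        pvAdjLoop_left rc (rc.length + 1) m [] (by omega) hmlt,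
        PySem.List.slice_to rc (show (0:Int) ≤ j from by omega)]
      have hts : j.toNat = m + 1 := by omega
      rw [hts]
      simp only [List.append_nil]
      by_cases hne : pvTrail (rc.take (m + 1)) = []
      · simp [hne]
      · rw [if_pos hne, if_pos hne]
        have : (m : Int) - (pvTrail (rc.take (m + 1))).length - -1
            = j - (pvTrail (rc.take (m + 1))).length := by omega
        rw [this]
    · rw [pvAdjLoop_ge rc (-1) (rc.length + 1) (j + -1) [] (by omega),
        if_neg (show ¬(0 ≤ j - 1 ∧ j - 1 < (rc.length : Int)) from by omega)]
      simp
  · rw [pvAdjLoop_neg rc (-1) (rc.length + 1) (j + -1) [] (by omega),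
      if_neg (show ¬(0 ≤ j - 1 ∧ j - 1 < (rc.length : Int)) from by omega)]
    simp

theorem cfa_eq (lines : List String) (i j d : Int) (row : String)
    (hrow : PySem.List.pyGet? lines i = some row) :
    check_for_adjacent_part_numbers lines i j d
      = ((pvAdjLoop row.toList d (row.toList.length + 1) j []).1,
         (pvAdjLoop row.toList d (row.toList.length + 1) j []).2 - d) := by
  unfold check_for_adjacent_part_numbers
  rw [hrow]

-- ===== VERDICT (by name: the statement is the Claim_ definition above) =====
theorem check_left_right_spec : Claim_equal_check_left_right := by
  intro lines i j hdom hpre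
  unfold Spec_check_left_right
  obtain ⟨row, hrow⟩ : ∃ row, PySem.List.pyGet? lines i = some row := by
    cases hg : PySem.List.pyGet? lines i with
    | some r => exact ⟨r, rfl⟩
    | none => exact absurd hpre (by rwa [PySem.List.pyGet?_eq_none_iff] at hg)
  simp only [check_left_right, check_left_right_alt, List.foldl, hrow]
  simp only [add_zero]
  rw [cfa_eq lines i (j + 1) 1 row hrow, cfa_eq lines i (j + -1) (-1) row hrow]
  rw [← rightPart row.toList i j, ← leftPart row.toList i j]
  split_ifs with h2 h1 h1 <;> simp [h1, h2]
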